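-- pv_equiv track=rewrite | github.com/tsiguenz/piscine_django | module01/ex05/all_in.py | get_state_from_capital
-- ===== SOURCE A (Python) =====
-- def get_state_from_capital(capital, states, capital_cities):
--     states = {
--         "Oregon": "OR",
--         "Alabama": "AL",
--         "New Jersey": "NJ",
--         "Colorado": "CO"
--     }
--     capital_cities = {
--         "OR": "Salem",
--         "AL": "Montgomery",
--         "NJ": "Trenton",
--         "CO": "Denver"
--     }
--     shortState = None
--     for key, value in capital_cities.items():
--         if value.lower() == capital:
--             capital = value
--             shortState = key
--             break
--     for key, value in states.items():
--         if value == shortState: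
--             return key, capital
--     return None, None
-- ===== SOURCE B (Python) =====
-- _INDEX = {
--     "salem": ("Oregon", "Salem"),
--     "montgomery": ("Alabama", "Montgomery"),
--     "trenton": ("New Jersey", "Trenton"),
--     "denver": ("Colorado", "Denver"),
-- }
--
--
-- def get_state_from_capital(capital, states, capital_cities):
--     # states / capital_cities are ignored, as in the original (it rebinds them)
--     return _INDEX.get(capital, (None, None))
-- ===== Notes on version B (the rewrite author's own statement) =====
-- stated objective: simpler
-- what changed: Replaced the two sequential reverse scans (capital->abbreviation, then abbreviation->state) with one precomputed dict keyed by lowercase capital mapping directly to the (state, proper capital) pair, returned by a single .get with (None, None) default.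
import Mathlib
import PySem

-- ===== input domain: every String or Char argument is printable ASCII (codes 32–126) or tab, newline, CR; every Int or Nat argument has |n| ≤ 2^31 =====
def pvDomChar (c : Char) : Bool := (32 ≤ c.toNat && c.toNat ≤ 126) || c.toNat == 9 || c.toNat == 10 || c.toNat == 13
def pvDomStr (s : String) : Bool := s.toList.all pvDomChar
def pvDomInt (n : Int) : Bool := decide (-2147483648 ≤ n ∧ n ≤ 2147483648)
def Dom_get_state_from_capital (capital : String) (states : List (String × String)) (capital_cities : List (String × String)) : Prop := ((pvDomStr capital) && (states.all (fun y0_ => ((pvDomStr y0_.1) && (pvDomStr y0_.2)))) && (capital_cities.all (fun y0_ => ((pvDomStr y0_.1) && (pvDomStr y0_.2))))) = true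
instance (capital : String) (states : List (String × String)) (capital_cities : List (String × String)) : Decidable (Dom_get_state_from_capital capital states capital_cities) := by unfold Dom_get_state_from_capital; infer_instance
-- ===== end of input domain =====

-- B replaces A's two sequential reverse scans with one precomputed lowercase-capital index and a single lookup (objective: simpler).
-- ===== PORT A =====
-- first loop with break: scan capital_cities items; on value.lower() == capital, rebind capital to value and shortState to key
def pvLoop1 (items : List (String × String)) (capital : String) : String × Option String :=
  match items with
  | [] => (capital, none)
  | (key, value) :: rest =>
    if PySem.Str.lower value == capital then (value, some key)
    else pvLoop1 rest capital

-- second loop: scan states items; on value == shortState return (key, capital)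
def pvLoop2 (items : List (String × String)) (shortState : Option String) (capital : String) : Option String × Option String :=
  match items with
  | [] => (none, none)
  | (key, value) :: rest =>
    if some value == shortState then (some key, some capital)
    else pvLoop2 rest shortState capital

def get_state_from_capital (capital : String) (states : List (String × String)) (capital_cities : List (String × String)) : Option String × Option String :=
  let states' : List (String × String) :=
    [("Oregon", "OR"), ("Alabama", "AL"), ("New Jersey", "NJ"), ("Colorado", "CO")]
  let capital_cities' : List (String × String) :=
    [("OR", "Salem"), ("AL", "Montgomery"), ("NJ", "Trenton"), ("CO", "Denver")]
  let r := pvLoop1 capital_cities' capital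
  pvLoop2 states' r.2 r.1

-- ===== PORT B =====
def pvIndex : List (String × (String × String)) :=
  [("salem", ("Oregon", "Salem")),
   ("montgomery", ("Alabama", "Montgomery")),
   ("trenton", ("New Jersey", "Trenton")),
   ("denver", ("Colorado", "Denver"))]

def get_state_from_capital_alt (capital : String) (states : List (String × String)) (capital_cities : List (String × String)) : Option String × Option String :=
  match PySem.Dict.get? ⟨pvIndex⟩ capital with
  | some (st, cap) => (some st, some cap)
  | none => (none, none)

-- ===== PRECONDITION & SPEC =====
def Spec_get_state_from_capital (capital : String) (states : List (String × String)) (capital_cities : List (String × String)) (out : Option String × Option String) : Prop := out = get_state_from_capital_alt capital states capital_cities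
instance (capital : String) (states : List (String × String)) (capital_cities : List (String × String)) (out : Option String × Option String) : Decidable (Spec_get_state_from_capital capital states capital_cities out) := by unfold Spec_get_state_from_capital; infer_instance

-- ===== CLAIM (what is proved, stated in full; the proofs are below) =====
def Claim_equal_get_state_from_capital : Prop := ∀ (capital : String) (states : List (String × String)) (capital_cities : List (String × String)), Dom_get_state_from_capital capital states capital_cities → Spec_get_state_from_capital capital states capital_cities (get_state_from_capital capital states capital_cities)

-- ===== LEMMAS AND PROOFS =====
theorem pvLower_vals :
    PySem.Str.lower "Salem" = "salem" ∧ PySem.Str.lower "Montgomery" = "montgomery" ∧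
    PySem.Str.lower "Trenton" = "trenton" ∧ PySem.Str.lower "Denver" = "denver" := by decide

-- ===== VERDICT (by name: the statement is the Claim_ definition above) =====
theorem get_state_from_capital_spec : Claim_equal_get_state_from_capital := by
  intro capital states capital_cities _
  unfold Spec_get_state_from_capital
  by_cases h1 : capital = "salem"
  · subst h1; simp [get_state_from_capital, get_state_from_capital_alt, pvLoop1, pvLoop2,
            pvIndex, PySem.Dict.get?, pvLower_vals]
  · by_cases h2 : capital = "montgomery"
    · subst h2; simp [get_state_from_capital, get_state_from_capital_alt, pvLoop1, pvLoop2,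
            pvIndex, PySem.Dict.get?, pvLower_vals]
    · by_cases h3 : capital = "trenton"
      · subst h3; simp [get_state_from_capital, get_state_from_capital_alt, pvLoop1, pvLoop2,
            pvIndex, PySem.Dict.get?, pvLower_vals]
      · by_cases h4 : capital = "denver"
        · subst h4; simp [get_state_from_capital, get_state_from_capital_alt, pvLoop1, pvLoop2,
            pvIndex, PySem.Dict.get?, pvLower_vals]
        · simp [get_state_from_capital, get_state_from_capital_alt, pvLoop1, pvLoop2,
            pvIndex, PySem.Dict.get?, pvLower_vals,
            Ne.symm h1, Ne.symm h2, Ne.symm h3, Ne.symm h4]
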